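-- pv_equiv track=rewrite | github.com/maheshalladi99/edyst | nobleint.py | solve
-- ===== SOURCE A (Python) =====
-- def solve(A):
--     for i in range(0, len(A)):
--         count = 0
--         for j in range(0, len(A)):
--             if (A[i] < A[j]):
--                 count += 1
--         if (count == A[i]):
--             return(1)
--             break
--     return(-1)
-- ===== SOURCE B (Python) =====
-- def solve(A):
--     s = sorted(A, reverse=True)
--     prev = None
--     for i, v in enumerate(s):
--         if v == i and (prev is None or prev != v):
--             return 1
--         prev = v
--     return -1
-- ===== Notes on version B (the rewrite author's own statement) =====
-- stated objective: faster
-- what changed: Replaces the nested O(n^2) count-per-element scan by sorting descending once: the strictly-greater count of a value is the index of its first occurrence in the sorted list, checked in one linear pass.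
import Mathlib
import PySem

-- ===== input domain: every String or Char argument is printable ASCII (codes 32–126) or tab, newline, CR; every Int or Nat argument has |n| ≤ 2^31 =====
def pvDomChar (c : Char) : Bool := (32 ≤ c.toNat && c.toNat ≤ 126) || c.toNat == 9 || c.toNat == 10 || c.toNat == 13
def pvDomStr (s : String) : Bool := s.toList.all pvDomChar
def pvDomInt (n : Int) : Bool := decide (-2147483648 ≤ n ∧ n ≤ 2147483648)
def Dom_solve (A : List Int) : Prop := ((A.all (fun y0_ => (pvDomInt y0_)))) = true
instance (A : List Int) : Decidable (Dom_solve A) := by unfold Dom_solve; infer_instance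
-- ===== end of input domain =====

-- B replaces A's nested quadratic count-per-element scan by one descending sort plus a
-- single linear pass (objective: faster, asymptotic O(n log n) vs O(n^2)).

-- ===== PORT A =====
-- inner loop: count = 0; for j: if A[i] < A[j]: count += 1
def solveCount (A : List Int) (ai : Int) : Int :=
  A.foldl (fun count aj => if ai < aj then count + 1 else count) 0

-- outer loop over i (A[i] runs over the elements of A, in order), early return 1
def solveLoop (A : List Int) : List Int → Int
  | [] => -1
  | ai :: rest => if solveCount A ai = ai then 1 else solveLoop A rest

def solve (A : List Int) : Int := solveLoop A A

-- ===== PORT B =====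
-- for i, v in enumerate(s): if v == i and (prev is None or prev != v): return 1; prev = v
def altLoop : List Int → Nat → Option Int → Int
  | [], _, _ => -1
  | v :: rest, i, prev =>
    if v = (i : Int) ∧ (prev = none ∨ prev ≠ some v) then 1
    else altLoop rest (i + 1) (some v)

def solve_alt (A : List Int) : Int :=
  altLoop (PySem.List.sorted A (fun x => x) true) 0 none

-- ===== PRECONDITION & SPEC =====
def Spec_solve (A : List Int) (out : Int) : Prop := out = solve_alt A
instance (A : List Int) (out : Int) : Decidable (Spec_solve A out) := by unfold Spec_solve; infer_instance

-- ===== CLAIM (what is proved, stated in full; the proofs are below) =====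
def Claim_equal_solve : Prop := ∀ (A : List Int), Dom_solve A → Spec_solve A (solve A)

-- ===== LEMMAS AND PROOFS =====

-- number of elements of A strictly greater than v
def cg (A : List Int) (v : Int) : Nat := A.countP (fun y => decide (v < y))

lemma solveCount_go (v : Int) (l : List Int) : ∀ (c : Int),
    l.foldl (fun count aj => if v < aj then count + 1 else count) c
      = c + (l.countP (fun y => decide (v < y)) : Int) := by
  induction l with
  | nil => intro c; simp
  | cons x t ih =>
    intro c
    simp only [List.foldl_cons, List.countP_cons]
    by_cases h : v < x
    · simp [h, ih]; ring
    · simp [h, ih]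

lemma solveCount_eq (A : List Int) (v : Int) : solveCount A v = (cg A v : Int) := by
  unfold solveCount cg
  simpa using solveCount_go v A 0

lemma solveLoop_eq (A : List Int) (l : List Int) :
    solveLoop A l = if ∃ v ∈ l, (cg A v : Int) = v then 1 else -1 := by
  induction l with
  | nil => simp [solveLoop]
  | cons x t ih =>
    simp only [solveLoop, solveCount_eq, ih]
    by_cases h : (cg A x : Int) = x
    · simp [h]
    · simp [h]

-- in a descending-sorted context, a member of the prefix equal to v must be its last element
lemma last_of_mem : ∀ (done : List Int) (v : Int), done.Pairwise (fun a b => b ≤ a) →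
    (∀ u ∈ done, v ≤ u) → v ∈ done → done.getLast? = some v := by
  intro done
  induction done with
  | nil => simp
  | cons d ds ih =>
    intro v hpw hge hm
    cases ds with
    | nil =>
      have : v = d := by simpa using hm
      simp [this]
    | cons e es =>
      rw [List.getLast?_cons_cons]
      rcases List.mem_cons.1 hm with rfl | hm'
      · have h1 : e ≤ v := (List.pairwise_cons.1 hpw).1 e (by simp)
        have h2 : v ≤ e := hge e (by simp)
        have he : e = v := le_antisymm h1 h2
        exact ih v hpw.tail (fun u hu => hge u (List.mem_cons_of_mem _ hu)) (by simp [he])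
      · exact ih v hpw.tail (fun u hu => hge u (List.mem_cons_of_mem _ hu)) hm'

-- the strictly-greater count of the head of the suffix is the prefix length
lemma cg_at (done rest : List Int) (v : Int)
    (hp : (done ++ v :: rest).Pairwise (fun a b => b ≤ a)) (hnm : v ∉ done) :
    cg (done ++ v :: rest) v = done.length := by
  unfold cg
  rw [List.countP_append]
  have hsplit := List.pairwise_append.1 hp
  have hdone : ∀ a ∈ done, (fun y => decide (v < y)) a = true := by
    intro a ha
    have h1 : v ≤ a := hsplit.2.2 a ha v (by simp)
    have h2 : a ≠ v := fun h => hnm (h ▸ ha)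
    simp only [decide_eq_true_eq]
    omega
  have hrest : (v :: rest).countP (fun y => decide (v < y)) = 0 := by
    rw [List.countP_eq_zero]
    intro b hb
    rcases List.mem_cons.1 hb with rfl | hb'
    · simp
    · have : b ≤ v := (List.pairwise_cons.1 hsplit.2.1).1 b hb'
      simp only [decide_eq_true_eq]
      omega
  rw [List.countP_eq_length.2 hdone, hrest]
  omega

lemma altLoop_eq (full : List Int) (hp : full.Pairwise (fun a b => b ≤ a)) :
    ∀ (s done : List Int), full = done ++ s →
      (∀ v ∈ done, (cg full v : Int) ≠ v) →
      altLoop s done.length done.getLast? =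
        if ∃ v ∈ s, (cg full v : Int) = v then 1 else -1 := by
  intro s
  induction s with
  | nil => intro done _ _; simp [altLoop]
  | cons v rest ih =>
    intro done hfull hnd
    have hp' : (done ++ v :: rest).Pairwise (fun a b => b ≤ a) := hfull ▸ hp
    have hsplit := List.pairwise_append.1 hp'
    have hmem_last : v ∈ done → done.getLast? = some v := fun hv =>
      last_of_mem done v hsplit.1 (fun u hu => hsplit.2.2 u hu v (by simp)) hv
    by_cases hg : v = (done.length : Int) ∧ (done.getLast? = none ∨ done.getLast? ≠ some v)
    · have hvn : v ∉ done := by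
        intro hv
        have hl := hmem_last hv
        rcases hg.2 with h0 | h1
        · rw [hl] at h0; cases h0
        · exact h1 hl
      have hcg : cg full v = done.length := by rw [hfull]; exact cg_at done rest v hp' hvn
      have hex : ∃ u ∈ v :: rest, (cg full u : Int) = u :=
        ⟨v, List.mem_cons_self, by rw [hcg]; exact hg.1.symm⟩
      have h1 : altLoop (v :: rest) done.length done.getLast? = 1 := by
        simp only [altLoop]
        rw [if_pos hg]
      rw [h1, if_pos hex]
    · have hne : (cg full v : Int) ≠ v := by
        by_cases hl : done.getLast? = some v
        · exact hnd v (List.mem_of_getLast? hl)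
        · have hvn : v ∉ done := fun hv => hl (hmem_last hv)
          have hcg : cg full v = done.length := by rw [hfull]; exact cg_at done rest v hp' hvn
          intro h
          exact hg ⟨by rw [← hcg]; exact h.symm, Or.inr hl⟩
      have hstep : altLoop (v :: rest) done.length done.getLast?
          = altLoop rest (done.length + 1) (some v) := by
        simp only [altLoop]
        rw [if_neg hg]
      have hih := ih (done ++ [v]) (by simpa using hfull) (by
        intro u hu
        rcases List.mem_append.1 hu with h | h
        · exact hnd u h
        · have : u = v := by simpa using h
          rw [this]; exact hne)
      simp only [List.length_append, List.length_cons, List.length_nil, Nat.zero_add,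
        List.getLast?_concat] at hih
      rw [hstep]
      rw [hih]
      have hiff : (∃ u ∈ rest, (cg full u : Int) = u) ↔ (∃ u ∈ v :: rest, (cg full u : Int) = u) := by
        simp only [List.mem_cons]
        constructor
        · rintro ⟨u, hu, h⟩; exact ⟨u, Or.inr hu, h⟩
        · rintro ⟨u, hu, h⟩
          rcases hu with rfl | hu
          · exact absurd h hne
          · exact ⟨u, hu, h⟩
      simp only [hiff]

-- ===== VERDICT (by name: the statement is the Claim_ definition above) =====
theorem solve_spec : Claim_equal_solve := by
  intro A _
  unfold Spec_solve solve solve_alt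
  have hperm : (PySem.List.sorted A (fun x => x) true).Perm A :=
    PySem.List.sorted_perm A (fun x => x) true
  have hpw : (PySem.List.sorted A (fun x => x) true).Pairwise (fun a b => b ≤ a) :=
    PySem.List.sorted_pairwise_rev A (fun x => x)
  have halt := altLoop_eq (PySem.List.sorted A (fun x => x) true) hpw
    (PySem.List.sorted A (fun x => x) true) [] rfl (by simp)
  simp only [List.length_nil, List.getLast?_nil] at halt
  rw [solveLoop_eq, halt]
  have hcg : ∀ v, cg (PySem.List.sorted A (fun x => x) true) v = cg A v := fun v =>
    hperm.countP_eq _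
  have hmem : ∀ v : Int, v ∈ PySem.List.sorted A (fun x => x) true ↔ v ∈ A := fun v =>
    hperm.mem_iff
  simp only [hcg, hmem]
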